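-- pv_equiv track=rewrite | github.com/bhavish-b194/govt_voice_chatbot | chatbot/web_scraper.py | _generate_search_tags
-- ===== SOURCE A (Python) =====
-- from typing import List, Dict, Optional
--
-- def _generate_search_tags(title: str, description: str) -> List[str]:
--     """Generate search tags for better searchability"""
--     text = (title + ' ' + description).lower()
--
--     tags = []
--
--     # Add sector tags
--     if any(word in text for word in ['farmer', 'agriculture', 'crop']):
--         tags.append('agriculture')
--     if any(word in text for word in ['health', 'medical', 'hospital']):
--         tags.append('health')
--     if any(word in text for word in ['education', 'school', 'student']):
--         tags.append('education')
--     if any(word in text for word in ['job', 'employment', 'work']):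
--         tags.append('employment')
--
--     # Add government level tags
--     if 'central' in text or 'national' in text:
--         tags.append('central')
--     if 'state' in text:
--         tags.append('state')
--
--     return tags
-- ===== SOURCE B (Python) =====
-- # B: single-pass text scanner — walk every position of the lowercased text once,
-- # prefix-matching keywords there into a found-set, then emit tags in canonical order.
-- _KEYWORD_TAG = [
--     ('farmer', 'agriculture'), ('agriculture', 'agriculture'), ('crop', 'agriculture'),
--     ('health', 'health'), ('medical', 'health'), ('hospital', 'health'),
--     ('education', 'education'), ('school', 'education'), ('student', 'education'),
--     ('job', 'employment'), ('employment', 'employment'), ('work', 'employment'),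
--     ('central', 'central'), ('national', 'central'),
--     ('state', 'state'),
-- ]
-- _TAG_ORDER = ['agriculture', 'health', 'education', 'employment', 'central', 'state']
--
-- def _generate_search_tags(title: str, description: str):
--     text = (title + ' ' + description).lower()
--     found = set()
--     for i in range(len(text)):
--         for kw, tag in _KEYWORD_TAG:
--             if text.startswith(kw, i):
--                 found.add(tag)
--     return [t for t in _TAG_ORDER if t in found]
-- ===== Notes on version B (the rewrite author's own statement) =====
-- stated objective: alternative
-- what changed: Replaces six independent substring-membership tests with a single left-to-right scan of the lowercased text that prefix-matches a keyword->tag list at each position, accumulating matched tags in a set and finally emitting them in canonical tag order.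
import Mathlib
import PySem

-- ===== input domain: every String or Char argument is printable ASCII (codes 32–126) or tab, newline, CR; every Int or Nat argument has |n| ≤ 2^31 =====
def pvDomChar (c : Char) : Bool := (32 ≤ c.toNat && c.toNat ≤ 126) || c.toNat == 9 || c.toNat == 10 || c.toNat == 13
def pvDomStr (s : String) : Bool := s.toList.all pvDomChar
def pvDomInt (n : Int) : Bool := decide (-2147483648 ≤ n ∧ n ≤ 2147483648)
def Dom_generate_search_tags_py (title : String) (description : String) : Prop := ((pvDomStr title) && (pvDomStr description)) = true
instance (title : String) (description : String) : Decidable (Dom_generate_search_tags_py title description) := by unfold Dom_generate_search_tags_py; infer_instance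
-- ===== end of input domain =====

-- B replaces A's six independent substring tests by one left-to-right scan of the text that prefix-matches a keyword→tag table at each position into a found-set; objective: alternative, same cost.


-- ===== PORT A =====
-- literal transliteration: text = (title + ' ' + description).lower(); then six if-blocks appending tags in order
def generate_search_tags_py (title : String) (description : String) : List String :=
  let text : List Char := PySem.Chars.lower (title.toList ++ [' '] ++ description.toList)
  let tags : List String := []
  let tags := if ["farmer", "agriculture", "crop"].any (fun w => PySem.Chars.isIn w.toList text) then tags ++ ["agriculture"] else tags
  let tags := if ["health", "medical", "hospital"].any (fun w => PySem.Chars.isIn w.toList text) then tags ++ ["health"] else tags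
  let tags := if ["education", "school", "student"].any (fun w => PySem.Chars.isIn w.toList text) then tags ++ ["education"] else tags
  let tags := if ["job", "employment", "work"].any (fun w => PySem.Chars.isIn w.toList text) then tags ++ ["employment"] else tags
  let tags := if PySem.Chars.isIn "central".toList text || PySem.Chars.isIn "national".toList text then tags ++ ["central"] else tags
  let tags := if PySem.Chars.isIn "state".toList text then tags ++ ["state"] else tags
  tags

-- ===== PORT B =====
def pvKeywordTag : List (String × String) :=
  [("farmer", "agriculture"), ("agriculture", "agriculture"), ("crop", "agriculture"),
   ("health", "health"), ("medical", "health"), ("hospital", "health"),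
   ("education", "education"), ("school", "education"), ("student", "education"),
   ("job", "employment"), ("employment", "employment"), ("work", "employment"),
   ("central", "central"), ("national", "central"),
   ("state", "state")]

def pvTagOrder : List String := ["agriculture", "health", "education", "employment", "central", "state"]

-- scan: for i in range(len(text)): for kw, tag in _KEYWORD_TAG: if text.startswith(kw, i): found.add(tag)
def generate_search_tags_py_alt (title : String) (description : String) : List String :=
  let text : List Char := PySem.Chars.lower (title.toList ++ [' '] ++ description.toList)
  let found : PySem.Set String :=
    (List.range text.length).foldl (fun acc i =>
      pvKeywordTag.foldl (fun acc2 kt =>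
        if PySem.Chars.startswith (text.drop i) kt.1.toList then PySem.Set.add acc2 kt.2 else acc2) acc)
      PySem.Set.empty
  pvTagOrder.filter (fun t => PySem.Set.contains found t)

-- ===== PRECONDITION & SPEC =====
def Spec_generate_search_tags_py (title : String) (description : String) (out : List String) : Prop := out = generate_search_tags_py_alt title description
instance (title : String) (description : String) (out : List String) : Decidable (Spec_generate_search_tags_py title description out) := by unfold Spec_generate_search_tags_py; infer_instance

-- ===== CLAIM (what is proved, stated in full; the proofs are below) =====
def Claim_equal_generate_search_tags_py : Prop := ∀ (title : String) (description : String), Dom_generate_search_tags_py title description → Spec_generate_search_tags_py title description (generate_search_tags_py title description)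

-- ===== LEMMAS AND PROOFS =====

-- inner loop over the keyword table: membership in the accumulated set
theorem pv_mem_inner (text : List Char) (i : Nat) (tbl : List (String × String)) (acc : PySem.Set String) (t : String) :
    t ∈ tbl.foldl (fun acc2 kt =>
        if PySem.Chars.startswith (text.drop i) kt.1.toList then PySem.Set.add acc2 kt.2 else acc2) acc ↔
      t ∈ acc ∨ ∃ kt ∈ tbl, kt.2 = t ∧ PySem.Chars.startswith (text.drop i) kt.1.toList = true := by
  induction tbl generalizing acc with
  | nil => simp
  | cons kt rest ih =>
    simp only [List.foldl_cons, ih, List.exists_mem_cons_iff]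
    by_cases h : PySem.Chars.startswith (text.drop i) kt.1.toList = true <;>
      simp only [h, if_true, PySem.Set.mem_add] <;> tauto

-- outer loop over positions
theorem pv_mem_outer (text : List Char) (idxs : List Nat) (acc : PySem.Set String) (t : String) :
    t ∈ idxs.foldl (fun acc i =>
        pvKeywordTag.foldl (fun acc2 kt =>
          if PySem.Chars.startswith (text.drop i) kt.1.toList then PySem.Set.add acc2 kt.2 else acc2) acc) acc ↔
      t ∈ acc ∨ ∃ i ∈ idxs, ∃ kt ∈ pvKeywordTag, kt.2 = t ∧ PySem.Chars.startswith (text.drop i) kt.1.toList = true := by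
  induction idxs generalizing acc with
  | nil => simp
  | cons j rest ih =>
    simp only [List.foldl_cons, ih, pv_mem_inner, List.exists_mem_cons_iff]
    exact or_assoc

-- a nonempty keyword matches at some scanned position iff it is a substring
theorem pv_scan_iff_isIn (text kw : List Char) (hkw : kw ≠ []) :
    (∃ i ∈ List.range text.length, PySem.Chars.startswith (text.drop i) kw = true) ↔
      PySem.Chars.isIn kw text = true := by
  rw [← PySem.Chars.exists_prefix_drop_iff_isIn]
  constructor
  · rintro ⟨i, _, hs⟩
    exact ⟨i, (PySem.Chars.startswith_iff _ _).mp hs⟩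
  · rintro ⟨j, hj⟩
    by_cases h : j < text.length
    · exact ⟨j, List.mem_range.mpr h, (PySem.Chars.startswith_iff _ _).mpr hj⟩
    · exfalso
      have : text.drop j = [] := List.drop_eq_nil_of_le (by omega)
      rw [this] at hj
      exact hkw (List.prefix_nil.mp hj)

-- membership of a tag in the final found-set, as a keyword-substring disjunction
theorem pv_found_iff (text : List Char) (t : String) :
    t ∈ ((List.range text.length).foldl (fun acc i =>
        pvKeywordTag.foldl (fun acc2 kt =>
          if PySem.Chars.startswith (text.drop i) kt.1.toList then PySem.Set.add acc2 kt.2 else acc2) acc)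
        PySem.Set.empty) ↔
      ∃ kt ∈ pvKeywordTag, kt.2 = t ∧ PySem.Chars.isIn kt.1.toList text = true := by
  rw [pv_mem_outer]
  constructor
  · rintro (h | ⟨i, hi, kt, hkt, ht, hs⟩)
    · simp [PySem.Set.empty] at h
    · refine ⟨kt, hkt, ht, ?_⟩
      have hne : kt.1.toList ≠ [] := by
        fin_cases hkt <;> simp
      exact (pv_scan_iff_isIn text kt.1.toList hne).mp ⟨i, hi, hs⟩
  · rintro ⟨kt, hkt, ht, hin⟩
    have hne : kt.1.toList ≠ [] := by
      fin_cases hkt <;> simp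
    obtain ⟨i, hi, hs⟩ := (pv_scan_iff_isIn text kt.1.toList hne).mpr hin
    exact Or.inr ⟨i, hi, kt, hkt, ht, hs⟩

-- the six-way if-chain of A and the six-way filter of B, both as one append of conditional singletons
theorem pv_bool6 (c1 c2 c3 c4 c5 c6 : Bool) :
    (let tags : List String := []
     let tags := if c1 then tags ++ ["agriculture"] else tags
     let tags := if c2 then tags ++ ["health"] else tags
     let tags := if c3 then tags ++ ["education"] else tags
     let tags := if c4 then tags ++ ["employment"] else tags
     let tags := if c5 then tags ++ ["central"] else tags
     let tags := if c6 then tags ++ ["state"] else tags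
     tags) =
    (if c1 then ["agriculture"] else []) ++ (if c2 then ["health"] else []) ++
      (if c3 then ["education"] else []) ++ (if c4 then ["employment"] else []) ++
      (if c5 then ["central"] else []) ++ (if c6 then ["state"] else []) := by
  cases c1 <;> cases c2 <;> cases c3 <;> cases c4 <;> cases c5 <;> cases c6 <;> rfl

theorem pv_filter6 (f : String → Bool) :
    pvTagOrder.filter f =
    (if f "agriculture" then ["agriculture"] else []) ++ (if f "health" then ["health"] else []) ++
      (if f "education" then ["education"] else []) ++ (if f "employment" then ["employment"] else []) ++
      (if f "central" then ["central"] else []) ++ (if f "state" then ["state"] else []) := by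
  rcases Bool.eq_false_or_eq_true (f "agriculture") with h1 | h1 <;>
  rcases Bool.eq_false_or_eq_true (f "health") with h2 | h2 <;>
  rcases Bool.eq_false_or_eq_true (f "education") with h3 | h3 <;>
  rcases Bool.eq_false_or_eq_true (f "employment") with h4 | h4 <;>
  rcases Bool.eq_false_or_eq_true (f "central") with h5 | h5 <;>
  rcases Bool.eq_false_or_eq_true (f "state") with h6 | h6 <;>
  simp [pvTagOrder, List.filter_cons, h1, h2, h3, h4, h5, h6]

-- ===== VERDICT (by name: the statement is the Claim_ definition above) =====
set_option maxHeartbeats 2000000 in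
theorem generate_search_tags_py_spec : Claim_equal_generate_search_tags_py := by
  intro title description _
  unfold Spec_generate_search_tags_py generate_search_tags_py generate_search_tags_py_alt
  set text : List Char := PySem.Chars.lower (title.toList ++ [' '] ++ description.toList) with htext
  have hfound : ∀ t : String,
      PySem.Set.contains ((List.range text.length).foldl (fun acc i =>
        pvKeywordTag.foldl (fun acc2 kt =>
          if PySem.Chars.startswith (text.drop i) kt.1.toList then PySem.Set.add acc2 kt.2 else acc2) acc)
        PySem.Set.empty) t =
      decide (∃ kt ∈ pvKeywordTag, kt.2 = t ∧ PySem.Chars.isIn kt.1.toList text = true) := by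
    intro t
    rw [Bool.eq_iff_iff, PySem.Set.contains_iff, pv_found_iff, decide_eq_true_eq]
  have e1 : decide (∃ kt ∈ pvKeywordTag, kt.2 = "agriculture" ∧ PySem.Chars.isIn kt.1.toList text = true)
      = (PySem.Chars.isIn "farmer".toList text || (PySem.Chars.isIn "agriculture".toList text || PySem.Chars.isIn "crop".toList text)) := by
    rw [Bool.eq_iff_iff]; simp [pvKeywordTag, or_assoc]
  have e2 : decide (∃ kt ∈ pvKeywordTag, kt.2 = "health" ∧ PySem.Chars.isIn kt.1.toList text = true)
      = (PySem.Chars.isIn "health".toList text || (PySem.Chars.isIn "medical".toList text || PySem.Chars.isIn "hospital".toList text)) := by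
    rw [Bool.eq_iff_iff]; simp [pvKeywordTag, or_assoc]
  have e3 : decide (∃ kt ∈ pvKeywordTag, kt.2 = "education" ∧ PySem.Chars.isIn kt.1.toList text = true)
      = (PySem.Chars.isIn "education".toList text || (PySem.Chars.isIn "school".toList text || PySem.Chars.isIn "student".toList text)) := by
    rw [Bool.eq_iff_iff]; simp [pvKeywordTag, or_assoc]
  have e4 : decide (∃ kt ∈ pvKeywordTag, kt.2 = "employment" ∧ PySem.Chars.isIn kt.1.toList text = true)
      = (PySem.Chars.isIn "job".toList text || (PySem.Chars.isIn "employment".toList text || PySem.Chars.isIn "work".toList text)) := by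
    rw [Bool.eq_iff_iff]; simp [pvKeywordTag, or_assoc]
  have e5 : decide (∃ kt ∈ pvKeywordTag, kt.2 = "central" ∧ PySem.Chars.isIn kt.1.toList text = true)
      = (PySem.Chars.isIn "central".toList text || PySem.Chars.isIn "national".toList text) := by
    rw [Bool.eq_iff_iff]; simp [pvKeywordTag]
  have e6 : decide (∃ kt ∈ pvKeywordTag, kt.2 = "state" ∧ PySem.Chars.isIn kt.1.toList text = true)
      = PySem.Chars.isIn "state".toList text := by
    rw [Bool.eq_iff_iff]; simp [pvKeywordTag]
  rw [pv_bool6, pv_filter6]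
  simp only [hfound, e1, e2, e3, e4, e5, e6, List.any_cons, List.any_nil, Bool.or_false]
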